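-- pv_equiv track=rewrite | github.com/Tachirilmrv/Numerica | src/complementaryMethods/functions.py | negative_interval
-- ===== SOURCE A (Python) =====
-- def positive_max_grade (values):
--     '''
--     Transforma la ecuacion y convierte el coeficiente de mayor grado a positivo
--
--     Argumentos:
--     ----------
--     values - coeficientes de la ecuacion
--
--     Devuelve:
--     --------
--     Lista de los coeficientes transformados
--     '''
--     coeficientes = [i * (-1) for i in values]
--     return coeficientes
--
-- def negative_interval (values):
--     '''
--     Transforma la ecuacion para hallar los ceros del intervalo negativo
--
--     Argumentos:
--     ----------
--     values - coeficientes de la ecuacion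
--
--     Devuelve:
--     --------
--     La lista de los coeficientes para el intervalo negativo
--     '''
--     result = list.copy(values)
--     if len (values) % 2 == 0: #si tiene una cantidad par de coeficientes significa que el grado es impar
--         i = 0
--         result = positive_max_grade(values)
--     else:
--         i = 1
--
--     for v in range (i,len (result) - 1, 2):
--         result[v] = result[v] * (-1)
--
--     return result
-- ===== SOURCE B (Python) =====
-- def negative_interval(values):
--     # One branch-free pass: odd-index coefficients negated, even-index unchanged.
--     return [-v if i % 2 else v for i, v in enumerate(values)]
-- ===== Notes on version B (the rewrite author's own statement) =====
-- stated objective: simpler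
-- what changed: Replaces A's length-parity branch, full-list negation helper and stepped in-place mutation loop by one branch-free enumerate comprehension that negates exactly the odd-index coefficients.
import Mathlib
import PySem

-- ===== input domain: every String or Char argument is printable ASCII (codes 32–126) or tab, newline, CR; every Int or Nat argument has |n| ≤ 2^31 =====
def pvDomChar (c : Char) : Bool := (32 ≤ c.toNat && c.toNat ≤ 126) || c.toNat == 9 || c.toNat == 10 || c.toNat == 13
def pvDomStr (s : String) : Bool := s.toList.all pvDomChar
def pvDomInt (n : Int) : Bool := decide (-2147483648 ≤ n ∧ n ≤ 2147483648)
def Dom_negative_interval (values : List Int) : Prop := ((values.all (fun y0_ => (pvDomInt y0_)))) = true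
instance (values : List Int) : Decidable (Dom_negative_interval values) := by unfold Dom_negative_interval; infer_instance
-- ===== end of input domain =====

-- B replaces A's parity branch + full negation helper + stepped in-place loop by one branch-free pass (simpler).

-- ===== PORT A =====
def positive_max_grade (values : List Int) : List Int :=
  values.map (fun i => i * (-1))

-- the loop indices v are always in range, so the total pySetD/pyGetD forms are exact here
def negative_interval (values : List Int) : List Int :=
  let result := values
  let st : Int × List Int :=
    if values.length % 2 = 0 then (0, positive_max_grade values) else (1, result)
  (PySem.List.pyRange st.1 ((st.2.length : Int) - 1) 2).foldl
    (fun r v => PySem.List.pySetD r v (PySem.List.pyGetD r v 0 * (-1))) st.2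

-- ===== PORT B =====
def negative_interval_alt (values : List Int) : List Int :=
  (PySem.List.enumerate values 0).map (fun p => if PySem.Int.mod p.1 2 ≠ 0 then -p.2 else p.2)

-- ===== PRECONDITION & SPEC =====
def Spec_negative_interval (values : List Int) (out : List Int) : Prop := out = negative_interval_alt values
instance (values : List Int) (out : List Int) : Decidable (Spec_negative_interval values out) := by unfold Spec_negative_interval; infer_instance

-- ===== CLAIM (what is proved, stated in full; the proofs are below) =====
def Claim_equal_negative_interval : Prop := ∀ (values : List Int), Dom_negative_interval values → Spec_negative_interval values (negative_interval values)

-- ===== LEMMAS AND PROOFS =====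

theorem negative_interval_def (values : List Int) :
    negative_interval values =
      (PySem.List.pyRange (if values.length % 2 = 0 then (0 : Int) else 1)
          ((((if values.length % 2 = 0 then positive_max_grade values else values)).length : Int) - 1) 2).foldl
        (fun r v => PySem.List.pySetD r v (PySem.List.pyGetD r v 0 * (-1)))
        (if values.length % 2 = 0 then positive_max_grade values else values) := by
  unfold negative_interval
  by_cases h : values.length % 2 = 0 <;> simp only [h, if_pos, if_false]

theorem flip_foldl_length (is : List Int) (r : List Int) :
    (is.foldl (fun r v => PySem.List.pySetD r v (PySem.List.pyGetD r v 0 * (-1))) r).length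
      = r.length := by
  induction is generalizing r with
  | nil => rfl
  | cons i t ih =>
    rw [List.foldl_cons, ih, PySem.List.length_pySetD]

theorem flip_foldl_getElem? (is : List Int) (r : List Int) (hnd : is.Nodup)
    (hin : ∀ i ∈ is, 0 ≤ i ∧ i < (r.length : Int)) (j : Nat) (hj : j < r.length) :
    (is.foldl (fun r v => PySem.List.pySetD r v (PySem.List.pyGetD r v 0 * (-1))) r)[j]?
      = some (if (j : Int) ∈ is then -r[j] else r[j]) := by
  induction is generalizing r with
  | nil => simp [List.getElem?_eq_getElem hj]
  | cons i t ih =>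
    obtain ⟨hi0, hilt⟩ := hin i (List.mem_cons_self ..)
    have hint : i ∉ t := (List.nodup_cons.mp hnd).1
    have hitn : i.toNat < r.length := by omega
    simp only [List.foldl_cons]
    rw [PySem.List.pyGetD_eq_getElem r 0 hi0 hilt, PySem.List.pySetD_of_nonneg r _ hi0,
      ih (r.set i.toNat (r[i.toNat] * (-1))) (List.nodup_cons.mp hnd).2
        (by intro x hx; simpa using hin x (List.mem_cons_of_mem _ hx)) (by simpa using hj)]
    by_cases hjt : (j : Int) ∈ t
    · have hji : i.toNat ≠ j := by
        intro hh; exact hint (by rwa [show (j : Int) = i by omega] at hjt)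
      simp [hjt, hji]
    · by_cases hji : (j : Int) = i
      · have hij : i.toNat = j := by omega
        simp [hji, hint, hij]
      · have hij : i.toNat ≠ j := by omega
        simp [hjt, hji, hij]

theorem pyRange_two_nodup (a b : Int) : (PySem.List.pyRange a b 2).Nodup := by
  rw [PySem.List.pyRange_of_pos a b (by norm_num)]
  exact (List.nodup_range).map (fun x y h => by omega)

theorem alt_getElem? (values : List Int) (j : Nat) (hj : j < values.length) :
    (negative_interval_alt values)[j]?
      = some (if j % 2 = 1 then -values[j] else values[j]) := by
  unfold negative_interval_alt
  have hj' : j < (PySem.List.enumerate values 0).length := by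
    rwa [PySem.List.length_enumerate]
  rw [List.getElem?_map, List.getElem?_eq_getElem hj', PySem.List.getElem_enumerate]
  have h2 : PySem.Int.mod ((j : Int)) 2 = ((j % 2 : Nat) : Int) := by
    rw [PySem.Int.mod_eq_emod_of_pos (by norm_num)]; omega
  rcases Nat.mod_two_eq_zero_or_one j with h | h
  · simp [h]
    intro hc; exfalso; omega
  · simp [h]
    intro hc; exfalso; omega

theorem alt_length (values : List Int) :
    (negative_interval_alt values).length = values.length := by
  unfold negative_interval_alt
  rw [List.length_map, PySem.List.length_enumerate]

theorem pmg_length (values : List Int) :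
    (positive_max_grade values).length = values.length := by
  unfold positive_max_grade; rw [List.length_map]

theorem negative_interval_spec : Claim_equal_negative_interval := by
  unfold Claim_equal_negative_interval
  intro values _
  unfold Spec_negative_interval
  apply List.ext_getElem?
  intro j
  rw [negative_interval_def]
  by_cases hjv : j < values.length
  case neg =>
    -- out of range on both sides
    rw [List.getElem?_eq_none (l := negative_interval_alt values) (by rw [alt_length]; omega),
        List.getElem?_eq_none]
    rw [flip_foldl_length]
    by_cases h : values.length % 2 = 0
    · rw [if_pos h, pmg_length]; omega
    · rw [if_neg h]; omega
  case pos =>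
  rw [alt_getElem? values j hjv]
  by_cases h : values.length % 2 = 0
  · -- even number of coefficients: negate everything, then re-negate the even indices
    rw [if_pos h, if_pos h]
    rw [flip_foldl_getElem? _ _ (pyRange_two_nodup _ _)
      (by
        intro x hx
        rw [PySem.List.mem_pyRange_iff_of_pos (by norm_num), pmg_length] at hx
        rw [pmg_length]; omega) j (by rw [pmg_length]; exact hjv)]
    have hmem : ((j : Int) ∈ PySem.List.pyRange 0 (((positive_max_grade values).length : Int) - 1) 2)
        ↔ j % 2 = 0 := by
      rw [PySem.List.mem_pyRange_iff_of_pos (by norm_num), pmg_length]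
      constructor
      · rintro ⟨-, -, hd⟩; omega
      · intro he; exact ⟨by omega, by omega, by omega⟩
    have hpg : ∀ (hk : j < (positive_max_grade values).length),
        (positive_max_grade values)[j] = values[j] * (-1) := by
      intro hk; simp [positive_max_grade]
    rcases Nat.mod_two_eq_zero_or_one j with hpar | hpar <;>
      simp [hmem, hpar, hpg]
  · -- odd number of coefficients: negate the odd indices of the copy
    rw [if_neg h, if_neg h]
    rw [flip_foldl_getElem? _ _ (pyRange_two_nodup _ _)
      (by
        intro x hx
        rw [PySem.List.mem_pyRange_iff_of_pos (by norm_num)] at hx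
        omega) j hjv]
    have hmem : ((j : Int) ∈ PySem.List.pyRange 1 ((values.length : Int) - 1) 2)
        ↔ j % 2 = 1 := by
      rw [PySem.List.mem_pyRange_iff_of_pos (by norm_num)]
      constructor
      · rintro ⟨h1, -, hd⟩; omega
      · intro ho; exact ⟨by omega, by omega, by omega⟩
    rcases Nat.mod_two_eq_zero_or_one j with hpar | hpar <;>
      simp [hmem, hpar]
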